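-- pv_equiv track=rewrite | github.com/sebastian57/motep_jax | motep_original_files/jax_engine/jax_jax_opt2.py | _generate_symmetric_indices
-- ===== SOURCE A (Python) =====
-- def _generate_symmetric_indices(nu):
--     """Generate unique symmetric tensor indices and their multiplicities."""
--     if nu == 0:
--         return [((), 1)]
--
--     indices = []
--     multiplicities = []
--
--     for i in range(nu + 1):
--         for j in range(nu + 1 - i):
--             k = nu - i - j
--             if k >= 0:
--                 from math import factorial
--                 mult = factorial(nu) // (factorial(i) * factorial(j) * factorial(k))
--                 indices.append((i, j, k))
--                 multiplicities.append(mult)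
--
--     return list(zip(indices, multiplicities))
-- ===== SOURCE B (Python) =====
-- def _generate_symmetric_indices(nu):
--     """Multinomials read off an additive Pascal's-triangle table (no factorials)."""
--     if nu == 0:
--         return [((), 1)]
--     rows = []
--     row = [1]
--     for _ in range(nu + 1):
--         rows.append(row)
--         row = [a + b for a, b in zip([0] + row, row + [0])]
--     out = []
--     for i in range(nu + 1):
--         for j in range(nu + 1 - i):
--             k = nu - i - j
--             out.append(((i, j, k), rows[nu][i] * rows[nu - i][j]))
--     return out
-- ===== Notes on version B (the rewrite author's own statement) =====
-- stated objective: alternative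
-- what changed: B precomputes one Pascal's-triangle table with the additive recurrence and reads each multinomial as a product of two binomial-table entries, instead of A's per-cell factorial computation and division.
import Mathlib
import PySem

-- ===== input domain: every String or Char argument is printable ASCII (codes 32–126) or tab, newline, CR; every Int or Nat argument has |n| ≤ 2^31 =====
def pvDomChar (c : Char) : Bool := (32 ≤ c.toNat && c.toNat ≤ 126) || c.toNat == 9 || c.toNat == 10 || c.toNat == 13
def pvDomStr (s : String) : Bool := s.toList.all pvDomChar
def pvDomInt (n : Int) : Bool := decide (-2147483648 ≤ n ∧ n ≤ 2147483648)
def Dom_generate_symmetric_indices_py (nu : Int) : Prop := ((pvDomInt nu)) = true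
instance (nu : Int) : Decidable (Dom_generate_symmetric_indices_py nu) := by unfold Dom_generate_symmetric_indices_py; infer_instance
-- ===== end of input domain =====

-- B replaces A's per-cell factorial/division multinomials by an additive Pascal's-triangle
-- table read as a product of two binomials (objective: alternative).

-- ===== PORT A =====
-- math.factorial; only ever applied to nonnegative arguments in A
def pyFac (n : Int) : Int := (Nat.factorial n.toNat : Int)

def generate_symmetric_indices_py (nu : Int) : List (List Int × Int) :=
  if nu = 0 then [([], 1)]
  else
    let st := (PySem.List.pyRange 0 (nu + 1) 1).foldl (fun (acc : List (List Int) × List Int) i =>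
      (PySem.List.pyRange 0 (nu + 1 - i) 1).foldl (fun acc j =>
        let k := nu - i - j
        if 0 ≤ k then
          let mult := PySem.Int.floordiv (pyFac nu) (pyFac i * pyFac j * pyFac k)
          (acc.1 ++ [[i, j, k]], acc.2 ++ [mult])
        else acc) acc) ([], [])
    st.1.zip st.2

-- ===== PORT B =====
-- row = [a + b for a, b in zip([0] + row, row + [0])]
def pascalNext (row : List Int) : List Int :=
  ((0 :: row).zip (row ++ [0])).map (fun p => p.1 + p.2)

def generate_symmetric_indices_py_alt (nu : Int) : List (List Int × Int) :=
  if nu = 0 then [([], 1)]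
  else
    let rows := ((PySem.List.pyRange 0 (nu + 1) 1).foldl
      (fun (st : List (List Int) × List Int) _ => (st.1 ++ [st.2], pascalNext st.2))
      ([], [1])).1
    (PySem.List.pyRange 0 (nu + 1) 1).foldl (fun out i =>
      (PySem.List.pyRange 0 (nu + 1 - i) 1).foldl (fun out j =>
        let k := nu - i - j
        out ++ [([i, j, k],
          PySem.List.pyGetD (PySem.List.pyGetD rows nu []) i 0 *
          PySem.List.pyGetD (PySem.List.pyGetD rows (nu - i) []) j 0)]) out) []

-- ===== PRECONDITION & SPEC =====
def Spec_generate_symmetric_indices_py (nu : Int) (out : List (List Int × Int)) : Prop := out = generate_symmetric_indices_py_alt nu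
instance (nu : Int) (out : List (List Int × Int)) : Decidable (Spec_generate_symmetric_indices_py nu out) := by unfold Spec_generate_symmetric_indices_py; infer_instance

-- ===== CLAIM (what is proved, stated in full; the proofs are below) =====
def Claim_equal_generate_symmetric_indices_py : Prop := ∀ (nu : Int), Dom_generate_symmetric_indices_py nu → Spec_generate_symmetric_indices_py nu (generate_symmetric_indices_py nu)

-- ===== LEMMAS AND PROOFS =====

-- A's two lists built in lockstep: one loop appending to a pair of lists
theorem foldl_pair_append {α β γ : Type} (l : List α) (F : α → List β) (G : α → List γ)
    (a : List β) (b : List γ) :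
    l.foldl (fun acc x => (acc.1 ++ F x, acc.2 ++ G x)) (a, b) = (a ++ l.flatMap F, b ++ l.flatMap G) := by
  induction l generalizing a b with
  | nil => simp
  | cons x xs ih => simp [List.foldl_cons, ih]

theorem zip_flatMap {ι α β γ : Type} (l : List ι) (F : ι → List α)
    (f : ι → α → β) (g : ι → α → γ) :
    (l.flatMap (fun i => (F i).map (f i))).zip (l.flatMap (fun i => (F i).map (g i)))
      = l.flatMap (fun i => (F i).map (fun x => (f i x, g i x))) := by
  induction l with
  | nil => simp
  | cons x xs ih =>
      simp only [List.flatMap_cons]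
      rw [List.zip_append (by simp), ih, List.zip_map']

-- the rows-building loop: the loop variable is ignored, the state iterates pascalNext
theorem foldl_iterate {α β : Type} (l : List β) (h : α → α) (acc : List α) (r : α) :
    l.foldl (fun st _ => (st.1 ++ [st.2], h st.2)) (acc, r)
      = (acc ++ (List.range l.length).map (fun t => h^[t] r), h^[l.length] r) := by
  induction l generalizing acc r with
  | nil => simp
  | cons x xs ih =>
      simp only [List.foldl_cons, ih, List.length_cons]
      rw [List.range_succ_eq_map]
      simp [Function.iterate_succ_apply, List.map_map, Function.comp_def]

def chooseRow (n : Nat) : List Int := (List.range (n + 1)).map (fun c => ((n.choose c : Nat) : Int))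

theorem pascalNext_chooseRow (n : Nat) : pascalNext (chooseRow n) = chooseRow (n + 1) := by
  apply List.ext_getElem
  · simp [pascalNext, chooseRow]
  · intro c h1 h2
    have hc : c < n + 2 := by have := h2; simp [chooseRow] at this; omega
    simp only [pascalNext, chooseRow, List.getElem_map, List.getElem_zip, List.getElem_range]
    have hR : ((List.range (n+1)).map (fun c => ((n.choose c : Nat) : Int)) ++ [(0:Int)])[c]'(by simp; omega)
        = ((n.choose c : Nat) : Int) := by
      rcases lt_or_ge c (n+1) with h | h
      · rw [List.getElem_append_left (by simp; omega)]; simp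
      · have : c = n + 1 := by omega
        subst this
        rw [List.getElem_append_right (by simp)]
        simp [Nat.choose_succ_self]
    rw [hR]
    cases c with
    | zero => simp
    | succ m =>
        rw [List.getElem_cons_succ]
        simp only [List.getElem_map, List.getElem_range]
        rw [Nat.choose_succ_succ']
        push_cast
        ring

theorem iterate_chooseRow (t : Nat) : pascalNext^[t] [1] = chooseRow t := by
  induction t with
  | zero => simp [chooseRow]
  | succ t ih => rw [Function.iterate_succ_apply', ih, pascalNext_chooseRow]

theorem mult_eq (nu i j : Int) (h0 : 0 ≤ i) (h1 : 0 ≤ j) (h2 : i + j ≤ nu) :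
    PySem.Int.floordiv (pyFac nu) (pyFac i * pyFac j * pyFac (nu - i - j))
      = ((nu.toNat.choose i.toNat * (nu.toNat - i.toNat).choose j.toNat : Nat) : Int) := by
  have hk : (nu - i - j).toNat = nu.toNat - i.toNat - j.toNat := by omega
  have h3 : nu.toNat.choose i.toNat * i.toNat.factorial * (nu.toNat - i.toNat).factorial
      = nu.toNat.factorial := Nat.choose_mul_factorial_mul_factorial (by omega)
  have h4 : (nu.toNat - i.toNat).choose j.toNat * j.toNat.factorial * (nu.toNat - i.toNat - j.toNat).factorial
      = (nu.toNat - i.toNat).factorial := Nat.choose_mul_factorial_mul_factorial (by omega)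
  have key : (nu.toNat.choose i.toNat * (nu.toNat - i.toNat).choose j.toNat) *
      (i.toNat.factorial * j.toNat.factorial * (nu.toNat - i.toNat - j.toNat).factorial)
      = nu.toNat.factorial := by rw [← h3, ← h4]; ring
  unfold pyFac
  rw [hk]
  have hcast : (i.toNat.factorial : Int) * (j.toNat.factorial : Int) * ((nu.toNat - i.toNat - j.toNat).factorial : Int)
      = ((i.toNat.factorial * j.toNat.factorial * (nu.toNat - i.toNat - j.toNat).factorial : Nat) : Int) := by
    push_cast; ring
  rw [hcast, PySem.Int.floordiv_natCast]
  congr 1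
  rw [← key, Nat.mul_div_cancel _
    (Nat.mul_pos (Nat.mul_pos (Nat.factorial_pos _) (Nat.factorial_pos _)) (Nat.factorial_pos _))]

-- ===== VERDICT (by name: the statement is the Claim_ definition above) =====
theorem flatMap_single {α β : Type} (l : List α) (f : α → β) :
    l.flatMap (fun x => [f x]) = l.map f := by
  induction l with
  | nil => rfl
  | cons x xs ih => simp [List.flatMap_cons, ih]

theorem table_get (N : Nat) (m : Int) (h0 : 0 ≤ m) (h1 : m.toNat < N) :
    PySem.List.pyGetD ((List.range N).map chooseRow) m ([] : List Int) = chooseRow m.toNat := by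
  rw [PySem.List.pyGetD_eq_getElem _ _ h0 (by simp; omega)]
  simp

theorem row_get (t : Nat) (x : Int) (h0 : 0 ≤ x) (h1 : x.toNat ≤ t) :
    PySem.List.pyGetD (chooseRow t) x 0 = ((t.choose x.toNat : Nat) : Int) := by
  rw [PySem.List.pyGetD_eq_getElem _ _ h0 (by simp [chooseRow]; omega)]
  simp [chooseRow]

-- ===== VERDICT (by name: the statement is the Claim_ definition above) =====
theorem generate_symmetric_indices_py_spec : Claim_equal_generate_symmetric_indices_py := by
  intro nu _
  unfold Spec_generate_symmetric_indices_py generate_symmetric_indices_py generate_symmetric_indices_py_alt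
  by_cases h0 : nu = 0
  · simp [h0]
  · simp only [if_neg h0]
    rcases lt_or_ge nu 0 with hneg | hpos
    · rw [PySem.List.pyRange_one_eq_nil (by omega)]
      simp
    · -- nu ≥ 1
      have hnu1 : 1 ≤ nu := by omega
      -- B's rows
      have hlen : (PySem.List.pyRange 0 (nu + 1) 1).length = nu.toNat + 1 := by
        rw [PySem.List.length_pyRange_one]; omega
      have hrows : ((PySem.List.pyRange 0 (nu + 1) 1).foldl
          (fun (st : List (List Int) × List Int) _ => (st.1 ++ [st.2], pascalNext st.2))
          ([], [1])).1 = (List.range (nu.toNat + 1)).map chooseRow := by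
        rw [foldl_iterate, hlen]
        simp only [List.nil_append]
        apply List.map_congr_left
        intro t _
        exact iterate_chooseRow t
      rw [hrows]
      -- A's loop: drop the always-true test, turn the pair fold into two flatMaps, zip them
      have hA : ((PySem.List.pyRange 0 (nu + 1) 1).foldl (fun (acc : List (List Int) × List Int) i =>
          (PySem.List.pyRange 0 (nu + 1 - i) 1).foldl (fun acc j =>
            let k := nu - i - j
            if 0 ≤ k then
              let mult := PySem.Int.floordiv (pyFac nu) (pyFac i * pyFac j * pyFac k)
              (acc.1 ++ [[i, j, k]], acc.2 ++ [mult])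
            else acc) acc) ([], []))
        = ((PySem.List.pyRange 0 (nu + 1) 1).flatMap (fun i => (PySem.List.pyRange 0 (nu + 1 - i) 1).map
              (fun j => [i, j, nu - i - j])),
           (PySem.List.pyRange 0 (nu + 1) 1).flatMap (fun i => (PySem.List.pyRange 0 (nu + 1 - i) 1).map
              (fun j => PySem.Int.floordiv (pyFac nu) (pyFac i * pyFac j * pyFac (nu - i - j))))) := by
        rw [PySem.List.foldl_congr_mem (g := fun (acc : List (List Int) × List Int) i =>
          (acc.1 ++ (PySem.List.pyRange 0 (nu + 1 - i) 1).map (fun j => [i, j, nu - i - j]),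
           acc.2 ++ (PySem.List.pyRange 0 (nu + 1 - i) 1).map
              (fun j => PySem.Int.floordiv (pyFac nu) (pyFac i * pyFac j * pyFac (nu - i - j)))))]
        · rw [foldl_pair_append]
          simp
        · intro acc i hi
          rw [PySem.List.mem_pyRange_one] at hi
          rw [PySem.List.foldl_congr_mem (g := fun (acc : List (List Int) × List Int) j =>
            (acc.1 ++ [[i, j, nu - i - j]],
             acc.2 ++ [PySem.Int.floordiv (pyFac nu) (pyFac i * pyFac j * pyFac (nu - i - j))]))]
          · rw [foldl_pair_append]
            refine Prod.ext ?_ ?_ <;> simp [flatMap_single]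
          · intro acc j hj
            rw [PySem.List.mem_pyRange_one] at hj
            simp only []
            rw [if_pos (by omega)]
      rw [hA, zip_flatMap]
      -- B's loop: two flatMaps as well
      rw [show (fun (out : List (List Int × Int)) i =>
          (PySem.List.pyRange 0 (nu + 1 - i) 1).foldl (fun out j =>
            let k := nu - i - j
            out ++ [([i, j, k],
              PySem.List.pyGetD (PySem.List.pyGetD ((List.range (nu.toNat + 1)).map chooseRow) nu []) i 0 *
              PySem.List.pyGetD (PySem.List.pyGetD ((List.range (nu.toNat + 1)).map chooseRow) (nu - i) []) j 0)]) out)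
        = (fun (out : List (List Int × Int)) i => out ++ (PySem.List.pyRange 0 (nu + 1 - i) 1).map (fun j =>
            ([i, j, nu - i - j],
              PySem.List.pyGetD (PySem.List.pyGetD ((List.range (nu.toNat + 1)).map chooseRow) nu []) i 0 *
              PySem.List.pyGetD (PySem.List.pyGetD ((List.range (nu.toNat + 1)).map chooseRow) (nu - i) []) j 0)))
        from funext fun out => funext fun i => PySem.List.foldl_append_singleton_eq_map _ _ _,
        PySem.List.foldl_append_eq_flatMap]
      simp only [List.nil_append]
      -- pointwise equality of the two flatMaps
      rw [List.flatMap_eq_foldl, List.flatMap_eq_foldl]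
      apply PySem.List.foldl_congr_mem
      intro acc i hi
      rw [PySem.List.mem_pyRange_one] at hi
      apply congrArg
      apply List.map_congr_left
      intro j hj
      rw [PySem.List.mem_pyRange_one] at hj
      refine Prod.ext rfl ?_
      simp only []
      rw [table_get _ _ (by omega) (by omega), table_get _ _ (by omega) (by omega),
        row_get _ _ (by omega) (by omega), row_get _ _ (by omega) (by omega),
        mult_eq nu i j (by omega) (by omega) (by omega)]
      have : (nu - i).toNat = nu.toNat - i.toNat := by omega
      rw [this]
      push_cast
      ring
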